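-- pv_equiv track=rewrite | github.com/RobinWinters/Yukon-Systems | yukon/debate.py | build_debate_prompt
-- ===== SOURCE A (Python) =====
-- from typing import List, Dict, Any, Optional
-- from collections import Counter
--
-- def aggregate_explanations(agent_results: List[Dict[str, Any]]) -> Dict[str, List[str]]:
--     """Group explanations by answer label, for debate prompt construction."""
--     exps = {}
--     for r in agent_results:
--         ans = r.get("answer", "")
--         exp = r.get("reasoning", "")
--         # Optionally could aggregate time info here by answer, but not needed for UI, so skip.
--         exps.setdefault(ans, []).append(exp)
--     return exps
--
-- def build_debate_prompt(agent_results: List[Dict[str, Any]]) -> str: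
--     """
--     Synthesize a prompt aggregating model disagreements and rationales.
--     Enhanced to request structured, step-by-step reasoning in responses.
--     """
--     answers = [r["answer"] for r in agent_results]
--     expl_by_ans = aggregate_explanations(agent_results)
--     ctr = Counter(answers).most_common(2)
--
--     s = "Please think step-by-step and provide structured reasoning with:\n"
--     s += "1. Key premises and assumptions\n"
--     s += "2. Logical reasoning steps\n"
--     s += "3. Your final conclusion\n\n"
--     s += "Consider these different viewpoints from other agents:\n\n"
--
--     for ans, count in ctr:
--         s += f"There are {count} agents who think the answer is '{ans}'.\n"
--         reasonings = expl_by_ans.get(ans, [])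
--         if reasonings:
--             s += "\n".join([f"One agent says: {e}" for e in reasonings])
--         s += "\n\n"
--
--     s += "Based on the information above, reconsider the question using structured reasoning."
--     s += "\nMake sure to explicitly explain your reasoning process and how you arrived at your conclusion."
--     # Optional: Could include timing summary in debate prompt if desired
--     return s.strip()
-- ===== SOURCE B (Python) =====
-- def build_debate_prompt(agent_results):
--     # No dict, no Counter, no sort: the top two answers are found by two
--     # max-scans over the distinct answers (first occurrence wins ties, as
--     # Counter.most_common does), and reasonings are re-scanned per answer.
--     answers = [r["answer"] for r in agent_results]
--     seen = []
--     for a in answers: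
--         if a not in seen:
--             seen.append(a)
--     top = []
--     for _ in range(2):
--         best = None
--         for a in seen:
--             if a in top:
--                 continue
--             if best is None or answers.count(a) > answers.count(best):
--                 best = a
--         if best is not None:
--             top.append(best)
--     out = ["Please think step-by-step and provide structured reasoning with:\n"
--            "1. Key premises and assumptions\n"
--            "2. Logical reasoning steps\n"
--            "3. Your final conclusion\n\n"
--            "Consider these different viewpoints from other agents:\n\n"]
--     for ans in top:
--         out.append(f"There are {answers.count(ans)} agents who think the answer is '{ans}'.\n")
--         out.append("\n".join("One agent says: " + r.get("reasoning", "")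
--                              for r in agent_results if r["answer"] == ans))
--         out.append("\n\n")
--     out.append("Based on the information above, reconsider the question using structured reasoning."
--                "\nMake sure to explicitly explain your reasoning process and how you arrived at your conclusion.")
--     return "".join(out)
-- ===== Notes on version B (the rewrite author's own statement) =====
-- stated objective: alternative
-- what changed: A's dict grouping, Counter and most_common sort are gone: B finds the top two answers by two max-scans over the distinct answers (strict '>' keeps the first occurrence on ties, matching most_common's stable sort), derives counts with list.count, re-scans agent_results per selected answer for reasonings, and joins the pieces instead of concatenating; the always-no-op trailing strip() is dropped.
import Mathlib
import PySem

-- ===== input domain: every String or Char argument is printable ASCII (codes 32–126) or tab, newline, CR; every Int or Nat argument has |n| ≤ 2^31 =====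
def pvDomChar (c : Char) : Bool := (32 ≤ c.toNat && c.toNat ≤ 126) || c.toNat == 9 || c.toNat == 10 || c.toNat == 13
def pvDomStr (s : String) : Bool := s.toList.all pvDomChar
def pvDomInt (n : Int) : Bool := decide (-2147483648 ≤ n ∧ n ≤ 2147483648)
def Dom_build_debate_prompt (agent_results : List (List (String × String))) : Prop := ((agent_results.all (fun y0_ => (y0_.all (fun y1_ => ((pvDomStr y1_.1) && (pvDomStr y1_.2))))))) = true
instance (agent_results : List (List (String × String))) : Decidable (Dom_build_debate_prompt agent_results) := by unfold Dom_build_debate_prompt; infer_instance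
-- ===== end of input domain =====

-- B drops A's dict/Counter/sort machinery entirely: it selects the top two answers by
-- two max-scans over the distinct answers (first occurrence wins ties, as
-- Counter.most_common's stable sort does) and re-scans agent_results per selected
-- answer for the reasonings; objective: alternative. Return value only (no mutation).

-- ===== PORT A =====
-- r.get("answer", "") / r.get("reasoning", "") → PySem.Dict.getD (exact)
def aggregate_explanations (agent_results : List (List (String × String))) :
    PySem.Dict String (List String) :=
  -- exps.setdefault(ans, []).append(exp) → modify with default [] appending (exact)
  agent_results.foldl
    (fun exps r =>
      exps.modify ((PySem.Dict.mk r).getD "answer" "")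
        [] (fun l => l ++ [(PySem.Dict.mk r).getD "reasoning" ""]))
    PySem.Dict.empty

def build_debate_prompt (agent_results : List (List (String × String))) : String :=
  -- r["answer"]: none = KeyError, excluded by Pre_ (the "" default is never used inside Pre_)
  let answers := agent_results.map (fun r => ((PySem.Dict.mk r).get? "answer").getD "")
  let expl_by_ans := aggregate_explanations agent_results
  -- Counter(answers).most_common(2): stable sort of counter items by count, descending
  let ctr := (PySem.List.sorted (PySem.Dict.counter answers).items (fun p => p.2) true).take 2
  let s := "Please think step-by-step and provide structured reasoning with:\n"
  let s := s ++ "1. Key premises and assumptions\n"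
  let s := s ++ "2. Logical reasoning steps\n"
  let s := s ++ "3. Your final conclusion\n\n"
  let s := s ++ "Consider these different viewpoints from other agents:\n\n"
  let s := ctr.foldl (fun s p =>
      let s := s ++ "There are " ++ PySem.Int.toStr p.2 ++ " agents who think the answer is '" ++ p.1 ++ "'.\n"
      let reasonings := expl_by_ans.getD p.1 []
      let s := if reasonings ≠ [] then
          s ++ PySem.Str.join "\n" (reasonings.map (fun e => "One agent says: " ++ e))
        else s
      s ++ "\n\n") s
  let s := s ++ "Based on the information above, reconsider the question using structured reasoning."
  let s := s ++ "\nMake sure to explicitly explain your reasoning process and how you arrived at your conclusion."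
  PySem.Str.strip s

-- ===== PORT B =====
def build_debate_prompt_alt (agent_results : List (List (String × String))) : String :=
  -- answers = [r["answer"] for r in agent_results]  (none = KeyError, excluded by Pre_)
  let answers := agent_results.map (fun r => ((PySem.Dict.mk r).get? "answer").getD "")
  -- distinct answers in first-occurrence order ('if a not in seen: seen.append(a)')
  let seen := answers.foldl (fun seen a => if a ∈ seen then seen else seen ++ [a]) []
  -- two max-scans; 'continue' on a in top, strict '>' keeps the first maximal answer
  let top := (PySem.List.pyRange 0 2 1).foldl (fun top _ =>
      let best := seen.foldl (fun best a =>
          if a ∈ top then best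
          else match best with
               | none => some a
               | some b => if answers.count a > answers.count b then some a else best) none
      match best with
      | none => top
      | some m => top ++ [m]) []
  -- out = [header]; appends per selected answer; reasonings re-scanned from agent_results
  let out := top.foldl (fun out ans =>
      out ++ ["There are " ++ PySem.Int.toStr ((answers.count ans : Nat) : Int)
                ++ " agents who think the answer is '" ++ ans ++ "'.\n",
              PySem.Str.join "\n" ((agent_results.filter
                  (fun r => (((PySem.Dict.mk r).get? "answer").getD "") == ans)).map
                  (fun r => "One agent says: " ++ (PySem.Dict.mk r).getD "reasoning" "")),
              "\n\n"])
    ["Please think step-by-step and provide structured reasoning with:\n1. Key premises and assumptions\n2. Logical reasoning steps\n3. Your final conclusion\n\nConsider these different viewpoints from other agents:\n\n"]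
  let out := out ++ ["Based on the information above, reconsider the question using structured reasoning.\nMake sure to explicitly explain your reasoning process and how you arrived at your conclusion."]
  PySem.Str.join "" out

-- ===== PRECONDITION & SPEC =====
-- Pre_ excludes exactly the inputs where Python A raises KeyError on r["answer"]
-- (B raises KeyError on the same inputs).
def Pre_build_debate_prompt (agent_results : List (List (String × String))) : Prop :=
  ∀ r ∈ agent_results, (PySem.Dict.mk r).contains "answer" = true
instance (agent_results : List (List (String × String))) : Decidable (Pre_build_debate_prompt agent_results) := by unfold Pre_build_debate_prompt; infer_instance

def pvWitness_build_debate_prompt : (List (List (String × String))) :=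
  [[("answer", "yes"), ("reasoning", "because")], [("answer", "no")], [("answer", "yes")]]

def Spec_build_debate_prompt (agent_results : List (List (String × String))) (out : String) : Prop := out = build_debate_prompt_alt agent_results
instance (agent_results : List (List (String × String))) (out : String) : Decidable (Spec_build_debate_prompt agent_results out) := by unfold Spec_build_debate_prompt; infer_instance

-- ===== CLAIM (what is proved, stated in full; the proofs are below) =====
def Claim_equal_build_debate_prompt : Prop := ∀ (agent_results : List (List (String × String))), Dom_build_debate_prompt agent_results → Pre_build_debate_prompt agent_results → Spec_build_debate_prompt agent_results (build_debate_prompt agent_results)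

-- ===== LEMMAS AND PROOFS =====

-- proof-side abbreviations for the values both programs extract from a record
def ansOf (r : List (String × String)) : String := ((PySem.Dict.mk r).get? "answer").getD ""
def reasOf (r : List (String × String)) : String := (PySem.Dict.mk r).getD "reasoning" ""
def answersOf (ars : List (List (String × String))) : List String := ars.map ansOf
def pairsOf (ars : List (List (String × String))) : List (String × String) :=
  ars.map (fun r => (ansOf r, reasOf r))
def grpOf (ars : List (List (String × String))) (k : String) : List String :=
  ((pairsOf ars).filter (fun p => p.1 == k)).map (fun p => p.2)
-- the grouping dict A builds
def grpDict (ars : List (List (String × String))) : PySem.Dict String (List String) :=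
  (pairsOf ars).foldl (fun d p => d.modify p.1 [] (fun l => l ++ [p.2])) PySem.Dict.empty
-- the selected (top-two) answers, the per-answer paragraph, the canonical output
def selOf (ars : List (List (String × String))) : List String :=
  (PySem.List.sorted (PySem.Set.ofList (answersOf ars))
    (fun k => -(((answersOf ars).count k : Nat) : Int)) false).take 2
def segOf (ars : List (List (String × String))) (k : String) : String :=
  "There are " ++ PySem.Int.toStr (((answersOf ars).count k : Nat) : Int)
    ++ " agents who think the answer is '" ++ k ++ "'.\n"
    ++ PySem.Str.join "\n" ((grpOf ars k).map (fun e => "One agent says: " ++ e)) ++ "\n\n"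
def concatS (l : List String) : String := l.foldr (· ++ ·) ""
def headerC : String := "Please think step-by-step and provide structured reasoning with:\n1. Key premises and assumptions\n2. Logical reasoning steps\n3. Your final conclusion\n\nConsider these different viewpoints from other agents:\n\n"
def footerC : String := "Based on the information above, reconsider the question using structured reasoning.\nMake sure to explicitly explain your reasoning process and how you arrived at your conclusion."
def canonOf (ars : List (List (String × String))) : String :=
  headerC ++ concatS ((selOf ars).map (segOf ars)) ++ footerC

theorem answersOf_def (ars : List (List (String × String))) :
    answersOf ars = ars.map (fun r => ((PySem.Dict.mk r).get? "answer").getD "") := rfl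

theorem aggregate_eq_grpDict (ars : List (List (String × String))) :
    aggregate_explanations ars = grpDict ars := by
  rw [grpDict, pairsOf, List.foldl_map]; rfl

theorem grpDict_getD (ars : List (List (String × String))) (k : String) :
    (grpDict ars).getD k [] = grpOf ars k := by
  rw [grpDict, PySem.Dict.getD_foldl_modify_append, PySem.Dict.getD_empty]
  simp [grpOf]

-- sorting with reverse=True is sorting by the negated Int key
theorem sorted_rev_eq_neg {α : Type} (xs : List α) (key : α → Int) :
    PySem.List.sorted xs key true = PySem.List.sorted xs (fun x => -(key x)) false := by
  rw [PySem.List.sorted_rev_eq_foldl_insertBy, PySem.List.sorted_eq_foldl_insertBy]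
  congr 1
  funext acc x
  congr 1
  funext a b
  simp [neg_lt_neg_iff]

-- insertion into a mapped list
theorem insertBy_map {α β : Type} (f : α → β) (b : α → α → Bool) (b' : β → β → Bool)
    (h : ∀ x y, b' (f x) (f y) = b x y) (x : α) (ys : List α) :
    (PySem.List.insertBy b x ys).map f = PySem.List.insertBy b' (f x) (ys.map f) := by
  induction ys with
  | nil => simp [PySem.List.insertBy]
  | cons y ys ih =>
    by_cases hb : b x y = true
    · simp [PySem.List.insertBy, hb, h]
    · simp only [Bool.not_eq_true] at hb
      simp [PySem.List.insertBy, hb, h, ih]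

-- sorting a mapped list = mapping the sorted base list
theorem sorted_map_false {α β κ : Type} [LT κ] [DecidableLT κ] (f : α → β) (l : List α) (key : β → κ) :
    PySem.List.sorted (l.map f) key false
      = (PySem.List.sorted l (fun x => key (f x)) false).map f := by
  rw [PySem.List.sorted_eq_foldl_insertBy, PySem.List.sorted_eq_foldl_insertBy]
  suffices h : ∀ (acc : List α),
      (l.map f).foldl (fun acc x => PySem.List.insertBy (fun a b => decide (key a < key b)) x acc) (acc.map f)
        = (l.foldl (fun acc x => PySem.List.insertBy (fun a b => decide (key (f a) < key (f b))) x acc) acc).map f by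
    simpa using h []
  induction l with
  | nil => intro acc; simp
  | cons y ys ih =>
    intro acc
    simp only [List.map_cons, List.foldl_cons]
    rw [← insertBy_map f (fun a b => decide (key (f a) < key (f b))) (fun a b => decide (key a < key b)) (fun _ _ => rfl)]
    exact ih _

theorem concatS_append (l1 l2 : List String) : concatS (l1 ++ l2) = concatS l1 ++ concatS l2 := by
  induction l1 with
  | nil => simp [concatS, String.empty_append]
  | cons a t ih => simp [concatS, List.foldr_cons] at ih ⊢; rw [ih, String.append_assoc]

theorem concatS_flatMap {α : Type} (l : List α) (g : α → List String) :
    concatS (l.flatMap g) = concatS (l.map (fun x => concatS (g x))) := by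
  induction l with
  | nil => rfl
  | cons a t ih =>
    simp only [List.flatMap_cons, List.map_cons, concatS_append]
    simp [concatS] at ih ⊢; rw [ih]

theorem intercalate_nil_cons (x : List (List Char)) (a : List Char) :
    ([] : List Char).intercalate (a :: x) = a ++ ([] : List Char).intercalate x := by
  cases x <;> simp [List.intercalate]

theorem join_empty_eq_concatS (l : List String) : PySem.Str.join "" l = concatS l := by
  induction l with
  | nil => rfl
  | cons a t ih =>
    show String.ofList (PySem.Chars.join "".toList ((a :: t).map String.toList)) = _
    simp only [List.map_cons, PySem.Chars.join]
    have h0 : "".toList = ([] : List Char) := rfl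
    rw [h0, intercalate_nil_cons, String.ofList_append, String.ofList_toList]
    simp only [PySem.Str.join, PySem.Chars.join, h0] at ih
    rw [ih]
    rfl

theorem foldl_append_str {α : Type} (l : List α) (g : α → String) (s0 : String) :
    l.foldl (fun s x => s ++ g x) s0 = s0 ++ concatS (l.map g) := by
  induction l generalizing s0 with
  | nil => simp [concatS, String.append_empty]
  | cons a t ih =>
    simp only [List.foldl_cons, List.map_cons]
    rw [ih]
    simp [concatS, String.append_assoc]

theorem foldl_ext {α : Type} (l : List α) (s0 : String) (f g : String → α → String)
    (h : ∀ s x, f s x = g s x) : l.foldl f s0 = l.foldl g s0 := by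
  have : f = g := funext fun s => funext fun x => h s x
  rw [this]

theorem strip_noop_str (s : String) (c d : Char)
    (hc : PySem.Chars.isspace c = false) (hd : PySem.Chars.isspace d = false)
    (h1 : ∃ t, s.toList = c :: t) (h2 : ∃ t, s.toList = t ++ [d]) :
    PySem.Str.strip s = s := by
  obtain ⟨ta, h1⟩ := h1
  obtain ⟨tb, h2⟩ := h2
  have hl : PySem.Chars.lstrip s.toList = s.toList := by
    rw [PySem.Chars.lstrip, h1]; simp [List.dropWhile, hc]
  have hr : PySem.Chars.rstrip s.toList = s.toList := by
    rw [PySem.Chars.rstrip, h2]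
    simp [hd]
  rw [PySem.Str.strip, PySem.Chars.strip, hl, hr, String.ofList_toList]

theorem join_nil : PySem.Str.join "\n" ([] : List String) = "" := by decide

set_option maxRecDepth 40000 in
theorem a_norm (ars : List (List (String × String))) :
    build_debate_prompt ars = PySem.Str.strip (canonOf ars) := by
  simp only [build_debate_prompt]
  rw [← answersOf_def, aggregate_eq_grpDict, PySem.Dict.items_counter]
  rw [sorted_rev_eq_neg]
  rw [sorted_map_false (fun k => (k, (List.count k (answersOf ars) : Int))) _ (fun x => -x.2)]
  simp only []
  rw [← List.map_take, ← selOf]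
  rw [foldl_ext _ _ _ (fun s (p : String × Int) => s ++
      ("There are " ++ PySem.Int.toStr p.2 ++ " agents who think the answer is '" ++ p.1 ++ "'.\n"
        ++ PySem.Str.join "\n" ((grpOf ars p.1).map (fun e => "One agent says: " ++ e)) ++ "\n\n"))
      (fun s p => by
        rw [grpDict_getD]
        by_cases h : grpOf ars p.1 = []
        · simp [h, join_nil, String.append_assoc, String.append_empty]
        · simp [h, String.append_assoc])]
  rw [foldl_append_str, List.map_map]
  have hseg : ((fun p : String × Int => "There are " ++ PySem.Int.toStr p.2 ++ " agents who think the answer is '" ++ p.1 ++ "'.\n"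
        ++ PySem.Str.join "\n" ((grpOf ars p.1).map (fun e => "One agent says: " ++ e)) ++ "\n\n")
      ∘ (fun k => (k, (List.count k (answersOf ars) : Int)))) = segOf ars := by
    funext k
    simp only [Function.comp, segOf]
  rw [hseg]
  congr 1
  simp [canonOf, headerC, footerC, String.append_assoc]

-- ---- B-side: the double max-scan equals take 2 of the stable descending sort ----

-- the step of B's inner scan, with an Int key (named so its equations are usable)
def fmStep (k : String → Int) (best : Option String) (a : String) : Option String :=
  match best with
  | none => some a
  | some b => if k a < k b then some a else best

-- the first element of s minimizing k (strict '<' keeps the earliest minimum)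
def firstMinBy (k : String → Int) (s : List String) : Option String :=
  s.foldl (fmStep k) none

def kOf (answers : List String) : String → Int := fun a => -((answers.count a : Nat) : Int)

theorem fmStep_some (k : String → Int) (b a : String) :
    fmStep k (some b) a = if k a < k b then some a else some b := rfl

theorem fm_some (k : String → Int) (t : List String) (b : String) :
    ∃ m, t.foldl (fmStep k) (some b) = some m ∧ (m = b ∨ m ∈ t) := by
  induction t generalizing b with
  | nil => exact ⟨b, rfl, Or.inl rfl⟩
  | cons a t ih =>
    rw [List.foldl_cons, fmStep_some]
    by_cases h : k a < k b
    · rw [if_pos h]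
      obtain ⟨m, hm, hmem⟩ := ih a
      exact ⟨m, hm, by rcases hmem with h' | h' <;> simp [h']⟩
    · rw [if_neg h]
      obtain ⟨m, hm, hmem⟩ := ih b
      exact ⟨m, hm, by rcases hmem with h' | h' <;> simp [h']⟩

theorem firstMinBy_cons (k : String → Int) (a : String) (s : List String) :
    firstMinBy k (a :: s) = s.foldl (fmStep k) (some a) := rfl

theorem firstMinBy_eq_none_iff (k : String → Int) (s : List String) :
    firstMinBy k s = none ↔ s = [] := by
  cases s with
  | nil => simp [firstMinBy]
  | cons a t =>
    rw [firstMinBy_cons]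
    obtain ⟨m, hm, _⟩ := fm_some k t a
    simp [hm]

theorem firstMinBy_mem (k : String → Int) (s : List String) (m : String)
    (h : firstMinBy k s = some m) : m ∈ s := by
  cases s with
  | nil => cases h
  | cons a t =>
    rw [firstMinBy_cons] at h
    obtain ⟨m', hm', hmem⟩ := fm_some k t a
    rw [hm'] at h
    injection h with h
    subst h
    rcases hmem with h' | h' <;> simp [h']

theorem firstMinBy_append (k : String → Int) (s : List String) (x : String) :
    firstMinBy k (s ++ [x]) = fmStep k (firstMinBy k s) x := by
  rw [firstMinBy, firstMinBy, List.foldl_append]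
  rfl

theorem sorted_append_singleton (k : String → Int) (s : List String) (x : String) :
    PySem.List.sorted (s ++ [x]) k false
      = PySem.List.insertBy (fun a b => decide (k a < k b)) x (PySem.List.sorted s k false) := by
  rw [PySem.List.sorted_eq_foldl_insertBy, PySem.List.sorted_eq_foldl_insertBy, List.foldl_append]
  rfl

-- stability of the insertion sort: the head is the FIRST minimal element, and the
-- tail is the sort of the list with that element removed (s without duplicates)
theorem sortedMin (k : String → Int) (s : List String) (h : s.Nodup) :
    PySem.List.sorted s k false =
      match firstMinBy k s with
      | none => []
      | some m => m :: PySem.List.sorted (s.erase m) k false := by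
  induction s using List.reverseRecOn with
  | nil => rfl
  | append_singleton s x ih =>
    have hx : x ∉ s := by
      rcases List.nodup_append.mp h with ⟨_, _, hd⟩
      intro hxs
      exact hd x hxs x (by simp) rfl
    have hs : s.Nodup := (List.nodup_append.mp h).1
    rw [sorted_append_singleton, firstMinBy_append]
    cases h1 : firstMinBy k s with
    | none =>
      have h0 : s = [] := (firstMinBy_eq_none_iff k s).mp h1
      subst h0
      simp [fmStep]
      rfl
    | some m =>
      have hm : m ∈ s := firstMinBy_mem k s m h1
      have ihs : PySem.List.sorted s k false = m :: PySem.List.sorted (s.erase m) k false := by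
        rw [ih hs, h1]
      rw [ihs, fmStep_some]
      by_cases hlt : k x < k m
      · rw [if_pos hlt]
        have he : (s ++ [x]).erase x = s := by
          rw [List.erase_append_right _ hx]
          simp
        show PySem.List.insertBy _ x (m :: PySem.List.sorted (s.erase m) k false)
            = x :: PySem.List.sorted ((s ++ [x]).erase x) k false
        rw [he, ihs]
        simp [PySem.List.insertBy, hlt]
      · rw [if_neg hlt]
        have he : (s ++ [x]).erase m = s.erase m ++ [x] := List.erase_append_left _ hm
        show PySem.List.insertBy _ x (m :: PySem.List.sorted (s.erase m) k false)
            = m :: PySem.List.sorted ((s ++ [x]).erase m) k false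
        rw [he, sorted_append_singleton]
        simp [PySem.List.insertBy, hlt]

theorem take_two_sorted (k : String → Int) (s : List String) (h : s.Nodup) :
    (PySem.List.sorted s k false).take 2 =
      match firstMinBy k s with
      | none => []
      | some m1 =>
        match firstMinBy k (s.erase m1) with
        | none => [m1]
        | some m2 => [m1, m2] := by
  rw [sortedMin k s h]
  cases h1 : firstMinBy k s with
  | none => rfl
  | some m1 =>
    show List.take 2 (m1 :: PySem.List.sorted (s.erase m1) k false)
        = match firstMinBy k (s.erase m1) with
          | none => [m1]
          | some m2 => [m1, m2]
    rw [sortedMin k (s.erase m1) (h.erase m1)]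
    cases h2 : firstMinBy k (s.erase m1) with
    | none => rfl
    | some m2 => rfl

-- B's seen-building loop is set(...) in first-occurrence order
theorem seen_eq (l : List String) :
    l.foldl (fun seen a => if a ∈ seen then seen else seen ++ [a]) []
      = PySem.Set.ofList l := by
  rw [PySem.Set.ofList_eq_foldl]
  apply PySem.List.foldl_congr_mem
  intro s a _
  by_cases h : a ∈ s <;> simp [PySem.Set.add, PySem.Set.contains, h]

-- B's scan step with Nat counts is fmStep with the negated-count Int key
theorem step_eq (answers : List String) (best : Option String) (a : String) :
    (match best with
     | none => some a
     | some b => if answers.count a > answers.count b then some a else best)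
    = fmStep (kOf answers) best a := by
  cases best with
  | none => rfl
  | some b =>
    rw [fmStep_some]
    exact if_congr (by unfold kOf; omega) rfl rfl

theorem scan_top_nil (answers seen : List String) :
    seen.foldl (fun best a =>
      if a ∈ ([] : List String) then best
      else match best with
           | none => some a
           | some b => if answers.count a > answers.count b then some a else best) none
    = firstMinBy (kOf answers) seen := by
  rw [firstMinBy]
  apply PySem.List.foldl_congr_mem
  intro best a _
  rw [if_neg (by simp)]
  exact step_eq answers best a

theorem scan_top_single (answers seen : List String) (m1 : String) (h : seen.Nodup) :
    seen.foldl (fun best a =>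
      if a ∈ [m1] then best
      else match best with
           | none => some a
           | some b => if answers.count a > answers.count b then some a else best) none
    = firstMinBy (kOf answers) (seen.erase m1) := by
  have he : seen.erase m1 = seen.filter (fun a => decide (¬ a ∈ [m1])) := by
    rw [List.Nodup.erase_eq_filter h]
    apply List.filter_congr
    intro x _
    by_cases hx : x = m1 <;> simp [hx]
  rw [firstMinBy, he, ← PySem.List.foldl_ite_eq_foldl_filter]
  apply PySem.List.foldl_congr_mem
  intro best a _
  by_cases hm : a ∈ [m1]
  · rw [if_pos hm, if_neg (by simpa using hm)]
  · rw [if_neg hm, if_pos hm, step_eq]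

-- B's two-pass selection is the first two entries of the stable descending sort
theorem top_eq (answers seen : List String) (h : seen.Nodup) :
    (PySem.List.pyRange 0 2 1).foldl (fun top _ =>
      let best := seen.foldl (fun best a =>
          if a ∈ top then best
          else match best with
               | none => some a
               | some b => if answers.count a > answers.count b then some a else best) none
      match best with
      | none => top
      | some m => top ++ [m]) []
    = (PySem.List.sorted seen (kOf answers) false).take 2 := by
  rw [take_two_sorted _ _ h]
  rw [show PySem.List.pyRange 0 2 1 = [0, 1] from rfl]
  simp only [List.foldl_cons, List.foldl_nil]
  rw [scan_top_nil]
  cases h1 : firstMinBy (kOf answers) seen with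
  | none =>
    have h0 : seen = [] := (firstMinBy_eq_none_iff _ _).mp h1
    subst h0
    rfl
  | some m1 =>
    show (match seen.foldl (fun best a =>
          if a ∈ [m1] then best
          else match best with
               | none => some a
               | some b => if answers.count a > answers.count b then some a else best) none with
      | none => [m1]
      | some m => [m1] ++ [m])
      = match firstMinBy (kOf answers) (seen.erase m1) with
        | none => [m1]
        | some m2 => [m1, m2]
    rw [scan_top_single answers seen m1 h]
    cases h2 : firstMinBy (kOf answers) (seen.erase m1) with
    | none => rfl
    | some m2 => rfl

-- per-answer reasoning scan = the grouped reasonings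
theorem filter_map_grp (ars : List (List (String × String))) (ans : String) :
    (ars.filter (fun r => (((PySem.Dict.mk r).get? "answer").getD "") == ans)).map
      (fun r => "One agent says: " ++ (PySem.Dict.mk r).getD "reasoning" "")
    = (grpOf ars ans).map (fun e => "One agent says: " ++ e) := by
  rw [grpOf, pairsOf, List.filter_map, List.map_map, List.map_map]
  rfl

theorem b_norm (ars : List (List (String × String))) :
    build_debate_prompt_alt ars = canonOf ars := by
  simp only [build_debate_prompt_alt]
  rw [← answersOf_def, seen_eq, top_eq (answersOf ars) _ (PySem.Set.nodup_ofList _)]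
  rw [show (PySem.List.sorted (PySem.Set.ofList (answersOf ars)) (kOf (answersOf ars)) false).take 2
      = selOf ars from rfl]
  rw [PySem.List.foldl_append_eq_flatMap, join_empty_eq_concatS]
  rw [concatS_append, concatS_append, concatS_flatMap]
  simp [canonOf, concatS, headerC, footerC, filter_map_grp,
    String.append_assoc, String.append_empty]
  refine congrArg _ (List.map_congr_left fun x _ => ?_)
  simp [segOf, String.append_assoc]

set_option maxRecDepth 40000 in
theorem canon_strip (ars : List (List (String × String))) :
    PySem.Str.strip (canonOf ars) = canonOf ars := by
  apply strip_noop_str _ 'P' '.' (by decide) (by decide)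
  · have hh : headerC.toList = 'P' :: ("lease think step-by-step and provide structured reasoning with:\n1. Key premises and assumptions\n2. Logical reasoning steps\n3. Your final conclusion\n\nConsider these different viewpoints from other agents:\n\n" : String).toList := by decide
    refine ⟨(("lease think step-by-step and provide structured reasoning with:\n1. Key premises and assumptions\n2. Logical reasoning steps\n3. Your final conclusion\n\nConsider these different viewpoints from other agents:\n\n" : String).toList
        ++ (concatS ((selOf ars).map (segOf ars))).toList) ++ footerC.toList, ?_⟩
    rw [canonOf, String.toList_append, String.toList_append, hh]
    simp only [List.cons_append, List.append_assoc]
  · have hf : footerC.toList = ("Based on the information above, reconsider the question using structured reasoning.\nMake sure to explicitly explain your reasoning process and how you arrived at your conclusion" : String).toList ++ ['.'] := by decide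
    refine ⟨(headerC ++ concatS ((selOf ars).map (segOf ars))).toList
        ++ ("Based on the information above, reconsider the question using structured reasoning.\nMake sure to explicitly explain your reasoning process and how you arrived at your conclusion" : String).toList, ?_⟩
    rw [canonOf, String.toList_append, hf, ← List.append_assoc]

-- ===== VERDICT (by name: the statement is the Claim_ definition above) =====
theorem build_debate_prompt_spec : Claim_equal_build_debate_prompt := by
  intro ars _ _
  unfold Spec_build_debate_prompt
  rw [a_norm, b_norm, canon_strip]
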